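-- pv_equiv track=rewrite | github.com/flying-adventure/baekjoon | 프로그래머스/0/181862. 세 개의 구분자/세 개의 구분자.py | solution
-- ===== SOURCE A (Python) =====
-- def solution(myStr):
--     ans=[]
--     for i in myStr.split("a"):
--         for p in i.split("b"):
--             for k in p.split("c"):
--                 if k:
--                     ans.append(k)
--     return ans if ans else ["EMPTY"]
-- ===== SOURCE B (Python) =====
-- def solution(myStr):
--     ans = []
--     buf = ""
--     for ch in myStr:
--         if ch in "abc":
--             if buf:
--                 ans.append(buf)
--                 buf = ""
--         else:
--             buf += ch
--     if buf:
--         ans.append(buf)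
--     return ans if ans else ["EMPTY"]
-- ===== Notes on version B (the rewrite author's own statement) =====
-- stated objective: alternative
-- what changed: Replaced the three nested split-and-loop passes (split by 'a', each piece by 'b', each by 'c') with a single left-to-right character scan maintaining a token buffer flushed at each delimiter and at the end.
import Mathlib
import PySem

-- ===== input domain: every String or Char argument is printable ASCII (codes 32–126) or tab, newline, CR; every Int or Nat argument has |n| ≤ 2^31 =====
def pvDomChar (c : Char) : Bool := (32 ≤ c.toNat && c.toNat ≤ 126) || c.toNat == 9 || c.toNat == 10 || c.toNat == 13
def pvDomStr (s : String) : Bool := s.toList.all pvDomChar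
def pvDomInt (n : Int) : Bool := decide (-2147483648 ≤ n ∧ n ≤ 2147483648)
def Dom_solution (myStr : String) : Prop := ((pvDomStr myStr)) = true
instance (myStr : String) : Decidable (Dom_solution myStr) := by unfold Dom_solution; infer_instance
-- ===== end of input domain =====

-- B replaces A's three nested split passes with one character scan and a token buffer (same results; one pass).

-- ===== PORT A =====
-- literal port of A: nested loops over split("a"), split("b"), split("c"), appending non-empty pieces
def solution (myStr : String) : List String :=
  let ans : List String :=
    (PySem.Chars.splitOn myStr.toList ['a']).foldl (fun ans i =>
      (PySem.Chars.splitOn i ['b']).foldl (fun ans p =>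
        (PySem.Chars.splitOn p ['c']).foldl (fun ans k =>
          if !k.isEmpty then ans ++ [String.ofList k] else ans) ans) ans) []
  if ans.isEmpty then ["EMPTY"] else ans

-- ===== PORT B =====
-- literal port of Source B: one pass with state (ans, buf); flush buf at delimiters and at the end
def solutionAltStep (st : List String × List Char) (c : Char) : List String × List Char :=
  if c == 'a' || c == 'b' || c == 'c' then
    if st.2.isEmpty then st else (st.1 ++ [String.ofList st.2], [])
  else (st.1, st.2 ++ [c])

def solution_alt (myStr : String) : List String :=
  let st := myStr.toList.foldl solutionAltStep ([], [])
  let ans := if st.2.isEmpty then st.1 else st.1 ++ [String.ofList st.2]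
  if ans.isEmpty then ["EMPTY"] else ans

-- ===== PRECONDITION & SPEC =====
def Spec_solution (myStr : String) (out : List String) : Prop := out = solution_alt myStr
instance (myStr : String) (out : List String) : Decidable (Spec_solution myStr out) := by unfold Spec_solution; infer_instance

-- ===== CLAIM (what is proved, stated in full; the proofs are below) =====
def Claim_equal_solution : Prop := ∀ (myStr : String), Dom_solution myStr → Spec_solution myStr (solution myStr)

-- ===== LEMMAS AND PROOFS =====

/-- Split a char list at every char satisfying `p` (Python-split style: keeps empty pieces). -/
def spP (p : Char → Bool) : List Char → List (List Char)
  | [] => [[]]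
  | c :: rest => if p c then [] :: spP p rest else (spP p rest).modifyHead (c :: ·)

theorem spP_ne_nil (p : Char → Bool) : ∀ (l : List Char), spP p l ≠ []
  | [] => by simp [spP]
  | c :: rest => by
    simp only [spP]
    split
    · simp
    · cases h : spP p rest with
      | nil => exact absurd h (spP_ne_nil p rest)
      | cons a t => simp [List.modifyHead]

theorem modifyHead_modifyHead {α : Type} (f g : α → α) (l : List α) :
    (l.modifyHead g).modifyHead f = l.modifyHead (fun x => f (g x)) := by
  cases l <;> simp [List.modifyHead]

theorem modifyHead_append_left {α : Type} (f : α → α) (l l' : List α) (h : l ≠ []) :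
    (l ++ l').modifyHead f = l.modifyHead f ++ l' := by
  cases l with
  | nil => exact absurd rfl h
  | cons a t => simp [List.modifyHead]

theorem splitOn_go_eq (d : Char) (fuel : Nat) :
    ∀ (l cur : List Char) (accs : List (List Char)), l.length ≤ fuel →
      PySem.Chars.splitOn.go [d] fuel l cur accs =
        accs.reverse ++ (spP (fun c => c == d) l).modifyHead (cur.reverse ++ ·) := by
  induction fuel with
  | zero =>
    intro l cur accs hl
    have : l = [] := List.eq_nil_of_length_eq_zero (Nat.le_zero.mp hl)
    subst this
    simp [PySem.Chars.splitOn.go, spP, List.modifyHead]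
  | succ fuel ih =>
    intro l cur accs hl
    cases l with
    | nil => simp [PySem.Chars.splitOn.go, spP, List.modifyHead]
    | cons c rest =>
      rw [PySem.Chars.splitOn.go]
      by_cases hc : c = d
      · subst hc
        have hpre : [c].isPrefixOf (c :: rest) = true := by simp [List.isPrefixOf]
        rw [if_pos hpre]
        simp only [List.length_cons, List.length_nil, List.drop_succ_cons, List.drop_zero]
        rw [ih rest [] (cur.reverse :: accs) (by simpa using Nat.le_of_succ_le_succ hl)]
        simp only [spP, beq_self_eq_true, if_pos]
        cases h : spP (fun x => x == c) rest with
        | nil => exact absurd h (spP_ne_nil _ rest)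
        | cons a t => simp [List.modifyHead]
      · have hpre : [d].isPrefixOf (c :: rest) = false := by
          simp [List.isPrefixOf]
          exact fun h => (hc h.symm).elim
        rw [if_neg (by simp [hpre])]
        rw [ih rest (c :: cur) accs (by simpa using Nat.le_of_succ_le_succ hl)]
        simp only [spP, beq_iff_eq, if_neg hc]
        cases h : spP (fun x => x == d) rest with
        | nil => exact absurd h (spP_ne_nil _ rest)
        | cons a t => simp [List.modifyHead]

theorem splitOn_eq_spP (cs : List Char) (d : Char) :
    PySem.Chars.splitOn cs [d] = spP (fun c => c == d) cs := by
  have h := splitOn_go_eq d (cs.length + 1) cs [] [] (Nat.le_succ _)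
  simp only [PySem.Chars.splitOn]
  rw [h]
  cases spP (fun c => c == d) cs <;> simp [List.modifyHead]

theorem spP_flatMap (p q : Char → Bool) (cs : List Char) :
    (spP p cs).flatMap (spP q) = spP (fun c => p c || q c) cs := by
  induction cs with
  | nil => simp [spP]
  | cons c rest ih =>
    by_cases hp : p c = true
    · simp only [spP, hp, Bool.true_or, if_pos]
      simp [spP, ih]
    · cases h : spP p rest with
      | nil => exact absurd h (spP_ne_nil p rest)
      | cons a t =>
        have hrest : spP p (c :: rest) = (c :: a) :: t := by
          simp [spP, hp, h, List.modifyHead]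
        by_cases hq : q c = true
        · have hpq : (p c || q c) = true := by simp [hq]
          have hR : spP (fun x => p x || q x) (c :: rest) = [] :: spP (fun x => p x || q x) rest := by
            simp [spP, hpq]
          rw [hrest, hR, ← ih, h]
          have hca : spP q (c :: a) = [] :: spP q a := by simp [spP, hq]
          simp [hca]
        · have hpq : (p c || q c) = false := by simp [hp, hq]
          have hR : spP (fun x => p x || q x) (c :: rest) = (spP (fun x => p x || q x) rest).modifyHead (c :: ·) := by
            simp [spP, hpq]
          rw [hrest, hR, ← ih, h]
          have hca : spP q (c :: a) = (spP q a).modifyHead (c :: ·) := by simp [spP, hq]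
          simp only [List.flatMap_cons, hca]
          rw [modifyHead_append_left _ _ _ (spP_ne_nil q a)]

/-- the common value: tokens of `cs` split at a/b/c, empties dropped -/
def tokens (cs : List Char) : List String :=
  ((spP (fun c => c == 'a' || c == 'b' || c == 'c') cs).filter (fun t => !t.isEmpty)).map String.ofList

theorem foldl_ext_flat {α β : Type} (g : β → List α) (f : List α → β → List α)
    (hf : ∀ ans x, f ans x = ans ++ g x) :
    ∀ (l : List β) (ans : List α), l.foldl f ans = ans ++ l.flatMap g := by
  intro l
  induction l with
  | nil => simp
  | cons x t ih => intro ans; simp [List.foldl_cons, hf, ih]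

theorem foldl_if_append {α β : Type} (p : β → Bool) (f : β → α) :
    ∀ (l : List β) (ans : List α),
      l.foldl (fun ans k => if p k then ans ++ [f k] else ans) ans = ans ++ (l.filter p).map f := by
  intro l
  induction l with
  | nil => simp
  | cons x t ih =>
    intro ans
    by_cases hx : p x = true <;> simp [List.foldl_cons, hx, ih]

theorem flatMap_filter_map {α β γ : Type} (g : β → List α) (p : α → Bool) (f : α → γ) :
    ∀ (L : List β),
      L.flatMap (fun x => ((g x).filter p).map f) = ((L.flatMap g).filter p).map f := by
  intro L
  induction L with
  | nil => simp
  | cons x t ih => simp [List.flatMap_cons, List.filter_append, List.map_append, ih]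

theorem solution_eq_tokens (myStr : String) : solution myStr = (if (tokens myStr.toList).isEmpty then ["EMPTY"] else tokens myStr.toList) := by
  have h1 : ∀ (p : List Char) (ans : List String),
      (PySem.Chars.splitOn p ['c']).foldl
        (fun ans k => if !k.isEmpty then ans ++ [String.ofList k] else ans) ans
      = ans ++ ((spP (fun x => x == 'c') p).filter (fun t => !t.isEmpty)).map String.ofList := by
    intro p ans
    rw [splitOn_eq_spP]
    exact foldl_if_append _ _ _ ans
  have h2 : ∀ (i : List Char) (ans : List String),
      (PySem.Chars.splitOn i ['b']).foldl
        (fun ans p => (PySem.Chars.splitOn p ['c']).foldl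
          (fun ans k => if !k.isEmpty then ans ++ [String.ofList k] else ans) ans) ans
      = ans ++ (spP (fun x => x == 'b') i).flatMap
          (fun p => ((spP (fun x => x == 'c') p).filter (fun t => !t.isEmpty)).map String.ofList) := by
    intro i ans
    rw [splitOn_eq_spP]
    exact foldl_ext_flat _ _ (fun a x => h1 x a) _ ans
  have h3 :
      (PySem.Chars.splitOn myStr.toList ['a']).foldl
        (fun ans i => (PySem.Chars.splitOn i ['b']).foldl
          (fun ans p => (PySem.Chars.splitOn p ['c']).foldl
            (fun ans k => if !k.isEmpty then ans ++ [String.ofList k] else ans) ans) ans) []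
      = (spP (fun x => x == 'a') myStr.toList).flatMap (fun i =>
          (spP (fun x => x == 'b') i).flatMap
            (fun p => ((spP (fun x => x == 'c') p).filter (fun t => !t.isEmpty)).map String.ofList)) := by
    rw [splitOn_eq_spP]
    simpa using foldl_ext_flat _ _ (fun a x => h2 x a) _ []
  have h4 :
      (spP (fun x => x == 'a') myStr.toList).flatMap (fun i =>
          (spP (fun x => x == 'b') i).flatMap
            (fun p => ((spP (fun x => x == 'c') p).filter (fun t => !t.isEmpty)).map String.ofList))
      = tokens myStr.toList := by
    have e1 : ∀ i, (spP (fun x => x == 'b') i).flatMap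
        (fun p => ((spP (fun x => x == 'c') p).filter (fun t => !t.isEmpty)).map String.ofList)
        = ((spP (fun x => x == 'b' || x == 'c') i).filter (fun t => !t.isEmpty)).map String.ofList := by
      intro i
      rw [flatMap_filter_map, spP_flatMap]
    simp only [e1]
    rw [flatMap_filter_map, spP_flatMap]
    have hgr : (fun c => c == 'a' || (c == 'b' || c == 'c'))
        = (fun c : Char => c == 'a' || c == 'b' || c == 'c') := by
      funext c
      cases c == 'a' <;> cases c == 'b' <;> cases c == 'c' <;> rfl
    rw [hgr]
    rfl
  show (if _ then _ else _) = _
  rw [h3, h4]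

theorem alt_loop_inv (ans : List String) (buf : List Char) (l : List Char) :
    (let st := l.foldl solutionAltStep (ans, buf);
     if st.2.isEmpty then st.1 else st.1 ++ [String.ofList st.2]) =
    ans ++ (((spP (fun c => c == 'a' || c == 'b' || c == 'c') l).modifyHead (buf ++ ·)).filter
      (fun t => !t.isEmpty)).map String.ofList := by
  induction l generalizing ans buf with
  | nil =>
    by_cases hb : buf.isEmpty = true
    · have hb0 : buf = [] := by simpa using hb
      subst hb0
      simp [spP, List.modifyHead]
    · have hbne : (!buf.isEmpty) = true := by simp [hb]
      simp [spP, List.modifyHead, hb]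
  | cons c rest ih =>
    by_cases hd : (c == 'a' || c == 'b' || c == 'c') = true
    · have hsp : spP (fun x => x == 'a' || x == 'b' || x == 'c') (c :: rest)
          = [] :: spP (fun x => x == 'a' || x == 'b' || x == 'c') rest := by
        simp [spP, hd]
      by_cases hb : buf.isEmpty = true
      · have hb0 : buf = [] := by simpa using hb
        subst hb0
        have hstep : solutionAltStep (ans, ([] : List Char)) c = (ans, []) := by
          simp [solutionAltStep, hd]
        rw [List.foldl_cons, hstep, ih, hsp]
        cases h : spP (fun x => x == 'a' || x == 'b' || x == 'c') rest with
        | nil => exact absurd h (spP_ne_nil _ rest)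
        | cons a t => simp [List.modifyHead]
      · have hbne : (!buf.isEmpty) = true := by simp [hb]
        have hstep : solutionAltStep (ans, buf) c = (ans ++ [String.ofList buf], []) := by
          simp [solutionAltStep, hd, hb]
        rw [List.foldl_cons, hstep, ih, hsp]
        cases h : spP (fun x => x == 'a' || x == 'b' || x == 'c') rest with
        | nil => exact absurd h (spP_ne_nil _ rest)
        | cons a t => simp [List.modifyHead, hbne]
    · have hsp : spP (fun x => x == 'a' || x == 'b' || x == 'c') (c :: rest)
          = (spP (fun x => x == 'a' || x == 'b' || x == 'c') rest).modifyHead (c :: ·) := by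
        simp [spP, hd]
      have hstep : solutionAltStep (ans, buf) c = (ans, buf ++ [c]) := by
        simp [solutionAltStep, hd]
      rw [List.foldl_cons, hstep, ih, hsp, modifyHead_modifyHead]
      cases h : spP (fun x => x == 'a' || x == 'b' || x == 'c') rest with
      | nil => exact absurd h (spP_ne_nil _ rest)
      | cons a t => simp [List.modifyHead]

theorem alt_eq_tokens (myStr : String) : solution_alt myStr = (if (tokens myStr.toList).isEmpty then ["EMPTY"] else tokens myStr.toList) := by
  have h := alt_loop_inv [] [] myStr.toList
  have hm : (spP (fun c => c == 'a' || c == 'b' || c == 'c') myStr.toList).modifyHead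
        (fun x => ([] : List Char) ++ x)
      = spP (fun c => c == 'a' || c == 'b' || c == 'c') myStr.toList := by
    cases spP (fun c => c == 'a' || c == 'b' || c == 'c') myStr.toList <;> simp [List.modifyHead]
  rw [hm] at h
  simp only [solution_alt, tokens]
  rw [h]
  simp

-- ===== VERDICT (by name: the statement is the Claim_ definition above) =====
theorem solution_spec : Claim_equal_solution := by
  intro myStr _
  show solution myStr = solution_alt myStr
  rw [solution_eq_tokens, alt_eq_tokens]
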